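-- pv_equiv track=rewrite | github.com/jgoguen/jgoguen.github.io | py/unbound-adhosts.py | include_domain
-- ===== SOURCE A (Python) =====
-- from collections.abc import Iterable
--
-- def include_domain(needle: str, haystack: Iterable[str]) -> bool:
--     # I'd love to know how this gets onto some lists...
--     if '"(t.co)"' in needle:
--         return False
--
--     # Some entries, for some reason, are in a list and end with '\"'.
--     if needle.endswith('"'):
--         return False
--
--     for entry in haystack:
--         if needle == entry:
--             return False
--
--         entry_parts = list(reversed(entry.split(".")))
--         needle_parts = list(reversed(needle.split(".")))
--         # If the entry is longer than the needle, it can't be a match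
--         if len(entry_parts) > len(needle_parts):
--             continue
--
--         # We know at this point that the needle has at least as many parts as the
--         # current haystack entry. Now we can get the sub-list of needle the same length
--         # as the current entry parts list (which has been reversed so we're comparing
--         # parts starting from the TLD and moving to successive sub-domains); if the
--         # lists are equal, the domain should be excluded.
--         needle_sublist = needle_parts[:len(entry_parts)]
--         if needle_sublist == entry_parts:
--             return False
--
--     return True
-- ===== SOURCE B (Python) =====
-- def include_domain(needle: str, haystack) -> bool:
--     # I'd love to know how this gets onto some lists...
--     if '"(t.co)"' in needle:
--         return False
--
--     # Some entries, for some reason, are in a list and end with '\"'.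
--     if needle.endswith('"'):
--         return False
--
--     # Split the needle ONCE and precompute the set of its dot-boundary
--     # suffixes (as part tuples); each haystack entry then needs only one
--     # split and one set-membership test.
--     parts = needle.split(".")
--     suffixes = {tuple(parts[i:]) for i in range(len(parts))}
--
--     for entry in haystack:
--         if tuple(entry.split(".")) in suffixes:
--             return False
--
--     return True
-- ===== Notes on version B (the rewrite author's own statement) =====
-- stated objective: faster
-- what changed: Instead of re-splitting the needle and comparing reversed part-prefixes against every haystack entry, B splits the needle once, precomputes the set of its dot-boundary suffix part-tuples, and tests each entry's part tuple by set membership.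
import Mathlib
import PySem

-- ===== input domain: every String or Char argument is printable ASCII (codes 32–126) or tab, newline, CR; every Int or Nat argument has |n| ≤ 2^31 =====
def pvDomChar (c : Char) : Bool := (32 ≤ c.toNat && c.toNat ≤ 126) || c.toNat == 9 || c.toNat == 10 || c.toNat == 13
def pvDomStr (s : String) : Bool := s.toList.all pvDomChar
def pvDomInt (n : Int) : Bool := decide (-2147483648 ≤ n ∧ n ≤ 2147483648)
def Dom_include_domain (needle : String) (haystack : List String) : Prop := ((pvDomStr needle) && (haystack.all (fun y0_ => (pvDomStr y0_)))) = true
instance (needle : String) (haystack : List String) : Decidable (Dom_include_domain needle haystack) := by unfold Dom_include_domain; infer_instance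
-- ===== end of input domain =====

-- B splits the needle once and precomputes the set of its dot-boundary suffix part-lists,
-- so each haystack entry costs one split and one set lookup instead of re-splitting the
-- needle and comparing reversed prefixes per entry.

-- s.split(".") — the separator is the nonempty literal ".", so Python never raises;
-- PySem.Str.split? s "." = some of exactly this list.
def pySplitDot (s : String) : List String :=
  (PySem.Chars.splitOn s.toList ['.']).map String.ofList

-- ===== PORT A =====
def includeLoopA (needle : String) : List String → Bool
  | [] => true
  | entry :: rest =>
    if needle == entry then false
    else
      let entry_parts := (pySplitDot entry).reverse
      let needle_parts := (pySplitDot needle).reverse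
      if entry_parts.length > needle_parts.length then includeLoopA needle rest
      else
        let needle_sublist := PySem.List.slice needle_parts none (some (entry_parts.length : Int))
        if needle_sublist == entry_parts then false
        else includeLoopA needle rest

def include_domain (needle : String) (haystack : List String) : Bool :=
  if PySem.Str.isIn "\"(t.co)\"" needle then false
  else if PySem.Str.endswith needle "\"" then false
  else includeLoopA needle haystack

-- ===== PORT B =====
def includeLoopB (suffixes : PySem.Set (List String)) : List String → Bool
  | [] => true
  | entry :: rest =>
    if suffixes.contains (pySplitDot entry) then false
    else includeLoopB suffixes rest

def include_domain_alt (needle : String) (haystack : List String) : Bool :=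
  if PySem.Str.isIn "\"(t.co)\"" needle then false
  else if PySem.Str.endswith needle "\"" then false
  else
    let parts := pySplitDot needle
    let suffixes : PySem.Set (List String) :=
      PySem.Set.ofList ((PySem.List.pyRange 0 (parts.length : Int)).map
        (fun i => PySem.List.slice parts (some i)))
    includeLoopB suffixes haystack

-- ===== PRECONDITION & SPEC =====
def Spec_include_domain (needle : String) (haystack : List String) (out : Bool) : Prop := out = include_domain_alt needle haystack
instance (needle : String) (haystack : List String) (out : Bool) : Decidable (Spec_include_domain needle haystack out) := by unfold Spec_include_domain; infer_instance

-- ===== CLAIM (what is proved, stated in full; the proofs are below) =====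
def Claim_equal_include_domain : Prop := ∀ (needle : String) (haystack : List String), Dom_include_domain needle haystack → Spec_include_domain needle haystack (include_domain needle haystack)

-- ===== LEMMAS AND PROOFS =====

-- A simple structural characterisation of splitting on the single character '.'.
def spDot : List Char → List (List Char)
  | [] => [[]]
  | ch :: rest =>
    if ch = '.' then [] :: spDot rest
    else
      match spDot rest with
      | [] => [[ch]]
      | p :: ps => (ch :: p) :: ps

lemma spDot_ne_nil (l : List Char) : spDot l ≠ [] := by
  cases l with
  | nil => simp [spDot]
  | cons c rest =>
    simp only [spDot]
    split
    · simp
    · cases h : spDot rest <;> simp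

lemma splitGo_dot : ∀ (l : List Char) (fuel : Nat) (cur : List Char) (acc : List (List Char)), l.length < fuel →
    PySem.Chars.splitOn.go ['.'] fuel l cur acc =
      acc.reverse ++ ((cur.reverse ++ (spDot l).headI) :: (spDot l).tail) := by
  intro l
  induction l with
  | nil =>
    intro fuel cur acc hf
    cases fuel with
    | zero => omega
    | succ f => simp [PySem.Chars.splitOn.go, spDot]
  | cons c rest ih =>
    intro fuel cur acc hf
    cases fuel with
    | zero => omega
    | succ f =>
      simp only [PySem.Chars.splitOn.go]
      by_cases hc : c = '.'
      · subst hc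
        have hpre : List.isPrefixOf ['.'] ('.' :: rest) = true := by
          simp [List.isPrefixOf]
        rw [if_pos hpre]
        have : List.drop (List.length ['.']) ('.' :: rest) = rest := by simp
        rw [this, ih f [] (cur.reverse :: acc) (by simp at hf ⊢; omega)]
        rcases h : spDot rest with _ | ⟨p, ps⟩
        · exact absurd h (spDot_ne_nil rest)
        · simp [spDot, h]
      · have hpre : List.isPrefixOf ['.'] (c :: rest) = false := by
          simp [List.isPrefixOf]
          intro h; exact absurd h.symm hc
        rw [if_neg (by simp [hpre])]
        rw [ih f (c :: cur) acc (by simp at hf ⊢; omega)]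
        rcases h : spDot rest with _ | ⟨p, ps⟩
        · exact absurd h (spDot_ne_nil rest)
        · simp [spDot, h, if_neg hc]

lemma splitOn_dot (s : List Char) : PySem.Chars.splitOn s ['.'] = spDot s := by
  unfold PySem.Chars.splitOn
  rw [splitGo_dot s (s.length + 1) [] [] (by omega)]
  rcases h : spDot s with _ | ⟨p, ps⟩
  · exact absurd h (spDot_ne_nil s)
  · simp

lemma pySplitDot_ne_nil (s : String) : pySplitDot s ≠ [] := by
  unfold pySplitDot
  rw [splitOn_dot]
  rcases h : spDot s.toList with _ | ⟨p, ps⟩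
  · exact absurd h (spDot_ne_nil s.toList)
  · simp

-- suffix-by-reversed-prefix (A's comparison) ↔ suffix-by-drop (B's set elements)
lemma take_rev_iff_drop (P E : List String) (hE : E ≠ []) :
    (E.length ≤ P.length ∧ P.reverse.take E.length = E.reverse) ↔
      ∃ k, k < P.length ∧ P.drop k = E := by
  constructor
  · rintro ⟨hlen, htake⟩
    rw [List.take_reverse] at htake
    have hdrop : P.drop (P.length - E.length) = E := List.reverse_injective htake
    have hEpos : 0 < E.length := List.length_pos_iff.mpr hE
    exact ⟨P.length - E.length, by omega, hdrop⟩
  · rintro ⟨k, hk, hdrop⟩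
    have hlen : E.length = P.length - k := by rw [← hdrop]; simp
    refine ⟨by omega, ?_⟩
    rw [List.take_reverse]
    have : P.length - E.length = k := by omega
    rw [this, hdrop]

lemma contains_suffixSet (needle : String) (E : List String) :
    (PySem.Set.ofList ((PySem.List.pyRange 0 ((pySplitDot needle).length : Int)).map
        (fun i => PySem.List.slice (pySplitDot needle) (some i)))).contains E = true ↔
      ∃ k, k < (pySplitDot needle).length ∧ (pySplitDot needle).drop k = E := by
  rw [PySem.Set.contains_iff, PySem.Set.mem_ofList, List.mem_map]
  constructor
  · rintro ⟨i, hi, hsl⟩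
    rw [PySem.List.mem_pyRange_one] at hi
    rw [PySem.List.slice_from _ hi.1] at hsl
    refine ⟨i.toNat, by omega, hsl⟩
  · rintro ⟨k, hk, hdrop⟩
    refine ⟨(k : Int), ?_, ?_⟩
    · rw [PySem.List.mem_pyRange_one]; omega
    · rw [PySem.List.slice_from _ (by omega)]
      simpa using hdrop

lemma loops_eq (needle : String) (hs : List String) :
    includeLoopA needle hs =
      includeLoopB (PySem.Set.ofList ((PySem.List.pyRange 0 ((pySplitDot needle).length : Int)).map
        (fun i => PySem.List.slice (pySplitDot needle) (some i)))) hs := by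
  induction hs with
  | nil => rfl
  | cons entry rest ih =>
    simp only [includeLoopA, includeLoopB]
    cases hcont : (PySem.Set.ofList ((PySem.List.pyRange 0 ((pySplitDot needle).length : Int)).map
        (fun i => PySem.List.slice (pySplitDot needle) (some i)))).contains (pySplitDot entry) with
    | true =>
      obtain ⟨hlen, htake⟩ := (take_rev_iff_drop (pySplitDot needle) (pySplitDot entry)
        (pySplitDot_ne_nil entry)).mpr ((contains_suffixSet needle (pySplitDot entry)).mp hcont)
      by_cases hne : needle = entry
      · simp [hne]
      · rw [if_neg (by simp [hne])]
        rw [if_neg (by simp; omega)]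
        have hcond : (PySem.List.slice (pySplitDot needle).reverse none
            (some (((pySplitDot entry).reverse.length : Nat) : Int)) == (pySplitDot entry).reverse) = true := by
          rw [PySem.List.slice_to _ (Int.natCast_nonneg _)]
          simp only [List.length_reverse, Int.toNat_natCast]
          exact beq_iff_eq.mpr htake
        rw [if_pos hcond]
        simp
    | false =>
      have hnex : ¬ ∃ k, k < (pySplitDot needle).length ∧ (pySplitDot needle).drop k = pySplitDot entry := by
        intro hex
        rw [← contains_suffixSet needle (pySplitDot entry)] at hex
        rw [hcont] at hex
        exact Bool.false_ne_true hex
      have hne : ¬ (needle = entry) := by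
        intro h
        subst h
        exact hnex ⟨0, List.length_pos_iff.mpr (pySplitDot_ne_nil needle), rfl⟩
      rw [if_neg (by simp [hne])]
      by_cases hgt : (pySplitDot entry).reverse.length > (pySplitDot needle).reverse.length
      · rw [if_pos hgt]; exact ih
      · rw [if_neg hgt]
        have hcond : ¬ ((PySem.List.slice (pySplitDot needle).reverse none
            (some (((pySplitDot entry).reverse.length : Nat) : Int)) == (pySplitDot entry).reverse) = true) := by
          rw [PySem.List.slice_to _ (Int.natCast_nonneg _)]
          simp only [List.length_reverse, Int.toNat_natCast]
          simp only [List.length_reverse] at hgt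
          intro hbeq
          rw [beq_iff_eq] at hbeq
          exact hnex ((take_rev_iff_drop (pySplitDot needle) (pySplitDot entry)
            (pySplitDot_ne_nil entry)).mp ⟨by omega, hbeq⟩)
        rw [if_neg hcond]
        exact ih

-- ===== VERDICT (by name: the statement is the Claim_ definition above) =====
theorem include_domain_spec : Claim_equal_include_domain := by
  intro needle haystack _
  unfold Spec_include_domain include_domain include_domain_alt
  split
  · rfl
  · split
    · rfl
    · exact loops_eq needle haystack
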